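-- pv_equiv track=rewrite | github.com/zeus483/TenLib | tenlib/orchestrator.py | _split_text_by_reference_lengths
-- ===== SOURCE A (Python) =====
-- def _split_text_by_reference_lengths(text: str, reference_lengths: list[int]) -> list[str]:
--     if not reference_lengths:
--         return []
--
--     if not text:
--         return ["" for _ in reference_lengths]
--
--     safe_lengths = [max(length, 1) for length in reference_lengths]
--     total_reference = sum(safe_lengths)
--     total_chars = len(text)
--
--     segments: list[str] = []
--     start = 0
--     consumed_reference = 0
--
--     for length in safe_lengths[:-1]:
--         consumed_reference += length
--         target = round(consumed_reference / total_reference * total_chars)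
--         split_idx = _snap_split_index(text, target, start)
--         segments.append(text[start:split_idx].strip())
--         start = split_idx
--
--     segments.append(text[start:].strip())
--     return segments
--
-- def _snap_split_index(text: str, target: int, start: int) -> int:
--     """
--     Ajusta el corte a un límite natural cercano (salto de línea o puntuación).
--     """
--     if start >= len(text):
--         return len(text)
--
--     min_idx = start + 1
--     max_idx = len(text) - 1
--
--     if min_idx > max_idx:
--         return len(text)
--
--     target = max(min_idx, min(target, max_idx))
--     window = 120
--
--     for radius in range(window + 1):
--         left = target - radius
--         right = target + radius
--
--         if left >= min_idx and _is_natural_break(text, left):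
--             return left
--         if right <= max_idx and _is_natural_break(text, right):
--             return right
--
--     return target
--
-- def _is_natural_break(text: str, idx: int) -> bool:
--     prev_char = text[idx - 1] if idx > 0 else ""
--     curr_char = text[idx] if idx < len(text) else ""
--
--     if prev_char == "\n":
--         return True
--
--     if prev_char in ".?!;:" and (curr_char.isspace() or curr_char == "\n"):
--         return True
--
--     return False
-- ===== SOURCE B (Python) =====
-- def _split_text_by_reference_lengths(text: str, reference_lengths: list[int]) -> list[str]:
--     if not reference_lengths:
--         return []
--
--     if not text:
--         return ["" for _ in reference_lengths]
--
--     safe_lengths = [max(length, 1) for length in reference_lengths]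
--     total_reference = sum(safe_lengths)
--     total_chars = len(text)
--
--     # one pass over the text collecting every natural-break position (ascending)
--     breaks = [i for i in range(1, total_chars) if _is_natural_break(text, i)]
--
--     segments: list[str] = []
--     start = 0
--     consumed_reference = 0
--
--     for length in safe_lengths[:-1]:
--         consumed_reference += length
--         target = round(consumed_reference / total_reference * total_chars)
--         split_idx = _snap_with_breaks(breaks, total_chars, target, start)
--         segments.append(text[start:split_idx].strip())
--         start = split_idx
--
--     segments.append(text[start:].strip())
--     return segments
--
--
-- def _snap_with_breaks(breaks: list[int], n: int, target: int, start: int) -> int: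
--     if start >= n:
--         return n
--
--     min_idx = start + 1
--     max_idx = n - 1
--
--     if min_idx > max_idx:
--         return n
--
--     t = max(min_idx, min(target, max_idx))
--     lo = max(min_idx, t - 120)
--     hi = min(max_idx, t + 120)
--
--     best = None
--     for i in breaks:
--         if lo <= i <= hi:
--             d = i - t if i >= t else t - i
--             if best is None or d < best[0]:
--                 best = (d, i)
--     return best[1] if best is not None else t
--
--
-- def _is_natural_break(text: str, idx: int) -> bool:
--     prev_char = text[idx - 1] if idx > 0 else ""
--     curr_char = text[idx] if idx < len(text) else ""
--
--     if prev_char == "\n":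
--         return True
--
--     if prev_char in ".?!;:" and (curr_char.isspace() or curr_char == "\n"):
--         return True
--
--     return False
-- ===== Notes on version B (the rewrite author's own statement) =====
-- stated objective: faster
-- what changed: The per-segment expanding-radius probe (radius 0..120, re-testing characters around each target) is replaced by one pass collecting all natural-break indices into a sorted list, and each segment then picks the break nearest to its target inside the clamped +/-120 window by a single min-by-(distance, index) scan, with the clamped target as fallback; the proportional allocation, float rounding, slicing and strip are unchanged.
import Mathlib
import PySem

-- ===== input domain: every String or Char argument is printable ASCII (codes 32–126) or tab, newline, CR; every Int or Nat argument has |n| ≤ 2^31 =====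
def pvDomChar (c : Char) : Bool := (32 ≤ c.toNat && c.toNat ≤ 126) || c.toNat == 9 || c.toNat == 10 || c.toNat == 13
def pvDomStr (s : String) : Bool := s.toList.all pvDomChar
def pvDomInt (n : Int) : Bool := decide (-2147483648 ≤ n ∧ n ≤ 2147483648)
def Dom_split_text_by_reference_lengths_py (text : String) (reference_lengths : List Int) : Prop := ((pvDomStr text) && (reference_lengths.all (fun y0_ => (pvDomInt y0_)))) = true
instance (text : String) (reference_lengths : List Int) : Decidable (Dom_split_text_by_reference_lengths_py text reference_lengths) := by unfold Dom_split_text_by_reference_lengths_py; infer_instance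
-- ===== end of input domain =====

-- B replaces A's per-segment expanding-radius character probing by one precomputed sorted list of
-- natural-break indices and a min-by-(distance,index) scan over the clamped ±120 window (objective:
-- faster, measured; same allocation arithmetic, slicing and strip).

-- ===== SHARED HELPERS (identical Python code in A and in B) =====

-- Python's round(c/t*n): both source programs execute this very float expression, so both ports
-- share this exact integer model of the two IEEE-754 double roundings followed by round-half-even.
def pvRhe (q r den : Nat) : Nat :=
  if den < 2 * r ∨ (2 * r = den ∧ q % 2 = 1) then q + 1 else q

def pvFlDiv (num den : Nat) : Nat × Int :=
  if num = 0 ∨ den = 0 then (0, 0) else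
  let k : Int := (PySem.Int.bitLength (num : Int) : Int) - (PySem.Int.bitLength (den : Int) : Int)
  let big : Bool := if 0 ≤ k then decide (den * 2 ^ k.toNat ≤ num) else decide (den ≤ num * 2 ^ (-k).toNat)
  let e : Int := (if big then k else k - 1) - 52
  let num' : Nat := if 0 ≤ e then num else num * 2 ^ (-e).toNat
  let den' : Nat := if 0 ≤ e then den * 2 ^ e.toNat else den
  let m := pvRhe (num' / den') (num' % den') den'
  if m = 2 ^ 53 then (2 ^ 52, e + 1) else (m, e)

def pvFlMulNat (m : Nat) (e : Int) (n : Nat) : Nat × Int :=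
  let M := m * n
  let b := PySem.Int.bitLength (M : Int)
  if b ≤ 53 then (M, e) else
  let s := b - 53
  let m2 := pvRhe (M / 2 ^ s) (M % 2 ^ s) (2 ^ s)
  if m2 = 2 ^ 53 then (2 ^ 52, e + s + 1) else (m2, e + s)

def pvRoundME (m : Nat) (e : Int) : Nat :=
  if 0 ≤ e then m * 2 ^ e.toNat
  else pvRhe (m / 2 ^ (-e).toNat) (m % 2 ^ (-e).toNat) (2 ^ (-e).toNat)

def pvRound (c t n : Int) : Int :=
  let (m, e) := pvFlDiv c.toNat t.toNat
  let (m2, e2) := pvFlMulNat m e n.toNat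
  ((pvRoundME m2 e2 : Nat) : Int)

-- _is_natural_break(text, idx) (same helper in both Python programs)
def pvIsNB (cs : List Char) (idx : Int) : Bool :=
  let prev : Option Char := if 0 < idx then PySem.List.pyGet? cs (idx - 1) else none
  let curr : Option Char := if idx < (cs.length : Int) then PySem.List.pyGet? cs idx else none
  if prev == some '\n' then true
  else if (match prev with
           | some c => c ∈ ['.', '?', '!', ';', ':']
           | none => false)
          && (match curr with
              | some c => PySem.Chars.strIsspace [c] || c == '\n'
              | none => false) then true
  else false

-- ===== PORT A =====

-- the 'for radius in range(window + 1)' loop of _snap_split_index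
def pvSnapLoopA (cs : List Char) (minIdx maxIdx t : Int) : Nat → Int → Int
  | 0, _ => t
  | f + 1, radius =>
    let left := t - radius
    let right := t + radius
    if decide (minIdx ≤ left) && pvIsNB cs left then left
    else if decide (right ≤ maxIdx) && pvIsNB cs right then right
    else pvSnapLoopA cs minIdx maxIdx t f (radius + 1)

-- _snap_split_index(text, target, start)
def pvSnapA (cs : List Char) (target start : Int) : Int :=
  if (cs.length : Int) ≤ start then (cs.length : Int)
  else
    let minIdx := start + 1
    let maxIdx := (cs.length : Int) - 1
    if maxIdx < minIdx then (cs.length : Int)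
    else pvSnapLoopA cs minIdx maxIdx (max minIdx (min target maxIdx)) 121 0

-- one iteration of A's 'for length in safe_lengths[:-1]' loop; state = ((segments, start), consumed)
def pvStepA (cs : List Char) (totalRef : Int) (st : (List String × Int) × Int) (len : Int) :
    (List String × Int) × Int :=
  let consumed := st.2 + len
  let target := pvRound consumed totalRef (cs.length : Int)
  let si := pvSnapA cs target st.1.2
  ((st.1.1 ++ [String.ofList (PySem.Chars.strip (PySem.List.slice cs (some st.1.2) (some si)))], si), consumed)

def split_text_by_reference_lengths_py (text : String) (reference_lengths : List Int) : List String :=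
  if reference_lengths = [] then []
  else if text = "" then reference_lengths.map (fun _ => "")
  else
    let cs := text.toList
    let safe := reference_lengths.map (fun l => max l 1)
    let totalRef := safe.sum
    let st := (PySem.List.slice safe none (some (-1))).foldl (pvStepA cs totalRef) (([], 0), 0)
    st.1.1 ++ [String.ofList (PySem.Chars.strip (PySem.List.slice cs (some st.1.2) none))]

-- ===== PORT B =====

-- breaks = [i for i in range(1, total_chars) if _is_natural_break(text, i)]
def pvBreaks (cs : List Char) : List Int :=
  (PySem.List.pyRange 1 (cs.length : Int) 1).filter (fun i => pvIsNB cs i)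

-- the 'for i in breaks' min-by-(distance, index) scan of _snap_with_breaks
def pvPickStep (t lo hi : Int) (best : Option (Int × Int)) (i : Int) : Option (Int × Int) :=
  if decide (lo ≤ i) && decide (i ≤ hi) then
    let d := if t ≤ i then i - t else t - i
    match best with
    | none => some (d, i)
    | some (bd, bi) => if d < bd then some (d, i) else some (bd, bi)
  else best

def pvPick (t lo hi : Int) (breaks : List Int) : Option (Int × Int) :=
  breaks.foldl (pvPickStep t lo hi) none

-- _snap_with_breaks(breaks, n, target, start)
def pvSnapB (breaks : List Int) (n : Int) (target start : Int) : Int :=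
  if n ≤ start then n
  else
    let minIdx := start + 1
    let maxIdx := n - 1
    if maxIdx < minIdx then n
    else
      let t := max minIdx (min target maxIdx)
      let lo := max minIdx (t - 120)
      let hi := min maxIdx (t + 120)
      match pvPick t lo hi breaks with
      | none => t
      | some (_, bi) => bi

-- one iteration of B's loop; state = ((segments, start), consumed)
def pvStepB (cs : List Char) (breaks : List Int) (totalRef : Int) (st : (List String × Int) × Int)
    (len : Int) : (List String × Int) × Int :=
  let consumed := st.2 + len
  let target := pvRound consumed totalRef (cs.length : Int)
  let si := pvSnapB breaks (cs.length : Int) target st.1.2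
  ((st.1.1 ++ [String.ofList (PySem.Chars.strip (PySem.List.slice cs (some st.1.2) (some si)))], si), consumed)

def split_text_by_reference_lengths_py_alt (text : String) (reference_lengths : List Int) : List String :=
  if reference_lengths = [] then []
  else if text = "" then reference_lengths.map (fun _ => "")
  else
    let cs := text.toList
    let safe := reference_lengths.map (fun l => max l 1)
    let totalRef := safe.sum
    let breaks := pvBreaks cs
    let st := (PySem.List.slice safe none (some (-1))).foldl (pvStepB cs breaks totalRef) (([], 0), 0)
    st.1.1 ++ [String.ofList (PySem.Chars.strip (PySem.List.slice cs (some st.1.2) none))]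

-- ===== PRECONDITION & SPEC =====
def Spec_split_text_by_reference_lengths_py (text : String) (reference_lengths : List Int) (out : List String) : Prop := out = split_text_by_reference_lengths_py_alt text reference_lengths
instance (text : String) (reference_lengths : List Int) (out : List String) : Decidable (Spec_split_text_by_reference_lengths_py text reference_lengths out) := by unfold Spec_split_text_by_reference_lengths_py; infer_instance

-- ===== CLAIM (what is proved, stated in full; the proofs are below) =====
def Claim_equal_split_text_by_reference_lengths_py : Prop := ∀ (text : String) (reference_lengths : List Int), Dom_split_text_by_reference_lengths_py text reference_lengths → Spec_split_text_by_reference_lengths_py text reference_lengths (split_text_by_reference_lengths_py text reference_lengths)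

-- ===== LEMMAS AND PROOFS =====

-- a natural break can only sit strictly right of position 0
lemma pvIsNB_pos {cs : List Char} {i : Int} (h : pvIsNB cs i = true) : 0 < i := by
  by_contra hle
  simp [pvIsNB, hle] at h

-- once the running best distance bd is ≤ every remaining in-window distance, the scan keeps it
lemma pvPick_keep (t lo hi : Int) (l : List Int) (bd bi : Int)
    (h : ∀ i ∈ l, lo ≤ i → i ≤ hi → bd ≤ (if t ≤ i then i - t else t - i)) :
    l.foldl (pvPickStep t lo hi) (some (bd, bi)) = some (bd, bi) := by
  induction l with
  | nil => rfl
  | cons y l ih =>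
    have hy := h y (by simp)
    simp only [List.foldl_cons, pvPickStep]
    by_cases hw : lo ≤ y ∧ y ≤ hi
    · have := hy hw.1 hw.2
      rw [if_pos (by simp [hw.1, hw.2])]
      rw [if_neg (by omega)]
      exact ih (fun i hi' => h i (by simp [hi']))
    · rw [if_neg (by simpa [Decidable.not_and_iff_or_not] using hw)]
      exact ih (fun i hi' => h i (by simp [hi']))

-- the scan returns the element x of minimal (distance, index) among in-window elements
lemma pvPick_found (t lo hi : Int) (l : List Int) (x : Int)
    (hx : x ∈ l) (hxlo : lo ≤ x) (hxhi : x ≤ hi)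
    (hmin : ∀ i ∈ l, lo ≤ i → i ≤ hi → (if t ≤ x then x - t else t - x) ≤ (if t ≤ i then i - t else t - i))
    (hfirst : ∀ i ∈ l, lo ≤ i → i ≤ hi → (if t ≤ i then i - t else t - i) = (if t ≤ x then x - t else t - x) → x ≤ i)
    (hsort : l.Pairwise (· < ·)) :
    ∀ acc : Option (Int × Int),
      (∀ bd bi, acc = some (bd, bi) → (if t ≤ x then x - t else t - x) < bd) →
      l.foldl (pvPickStep t lo hi) acc = some ((if t ≤ x then x - t else t - x), x) := by
  revert hx hmin hfirst hsort
  induction l with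
  | nil => intro hx _ _ _; simp at hx
  | cons y l ih =>
    intro hx hmin hfirst hsort acc hacc
    obtain ⟨hy_lt, hsort'⟩ := List.pairwise_cons.mp hsort
    rw [List.foldl_cons]
    rcases List.mem_cons.mp hx with hxy | hxl
    · subst hxy
      have hkeep : ∀ i ∈ l, lo ≤ i → i ≤ hi →
          (if t ≤ x then x - t else t - x) ≤ (if t ≤ i then i - t else t - i) :=
        fun i hi' h1 h2 => hmin i (by simp [hi']) h1 h2
      cases acc with
      | none =>
        simp only [pvPickStep]
        rw [if_pos (by simp [hxlo, hxhi])]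
        exact pvPick_keep t lo hi l _ x hkeep
      | some p =>
        obtain ⟨bd, bi⟩ := p
        simp only [pvPickStep]
        rw [if_pos (by simp [hxlo, hxhi]), if_pos (hacc bd bi rfl)]
        exact pvPick_keep t lo hi l _ x hkeep
    · have hyx : y < x := hy_lt x hxl
      apply ih hxl (fun i hi' => hmin i (by simp [hi'])) (fun i hi' => hfirst i (by simp [hi'])) hsort'
      intro bd bi hacc'
      by_cases hw : lo ≤ y ∧ y ≤ hi
      · have hdxy : (if t ≤ x then x - t else t - x) < (if t ≤ y then y - t else t - y) := by
          rcases lt_or_eq_of_le (hmin y (by simp) hw.1 hw.2) with h | h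
          · exact h
          · exact absurd (hfirst y (by simp) hw.1 hw.2 h.symm) (by omega)
        cases acc with
        | none =>
          simp only [pvPickStep] at hacc'
          rw [if_pos (by simp [hw.1, hw.2])] at hacc'
          simp only [Option.some.injEq, Prod.mk.injEq] at hacc'
          rw [← hacc'.1]; exact hdxy
        | some p =>
          obtain ⟨cd, ci⟩ := p
          have hcd := hacc cd ci rfl
          simp only [pvPickStep] at hacc'
          rw [if_pos (by simp [hw.1, hw.2])] at hacc'
          by_cases hlt : (if t ≤ y then y - t else t - y) < cd
          · rw [if_pos hlt] at hacc'
            simp only [Option.some.injEq, Prod.mk.injEq] at hacc'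
            rw [← hacc'.1]; exact hdxy
          · rw [if_neg hlt] at hacc'
            simp only [Option.some.injEq, Prod.mk.injEq] at hacc'
            rw [← hacc'.1]; exact hcd
      · have hstep : pvPickStep t lo hi acc y = acc := by
          simp only [pvPickStep]
          rw [if_neg (by simpa [Decidable.not_and_iff_or_not] using hw)]
        rw [hstep] at hacc'
        exact hacc bd bi hacc'

-- if nothing in the window qualifies, the scan returns none
lemma pvPick_none (t lo hi : Int) (l : List Int)
    (h : ∀ i ∈ l, ¬ (lo ≤ i ∧ i ≤ hi)) : pvPick t lo hi l = none := by
  unfold pvPick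
  induction l with
  | nil => rfl
  | cons y l ih =>
    simp only [List.foldl_cons, pvPickStep]
    rw [if_neg (by simpa [Decidable.not_and_iff_or_not] using h y (by simp))]
    exact ih (fun i hi' => h i (by simp [hi']))

-- membership in B's candidate window over the precomputed break list
lemma mem_breaks_iff (cs : List Char) (i : Int) :
    i ∈ pvBreaks cs ↔ 1 ≤ i ∧ i < (cs.length : Int) ∧ pvIsNB cs i = true := by
  simp [pvBreaks, List.mem_filter, PySem.List.mem_pyRange_one, and_assoc]

lemma breaks_sorted (cs : List Char) : (pvBreaks cs).Pairwise (· < ·) :=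
  (PySem.List.pairwise_lt_pyRange_one 1 (cs.length : Int)).filter _

-- the heart: A's expanding-radius loop equals B's min-scan over the break list
lemma snapLoop_eq_pick (cs : List Char) (minIdx maxIdx t : Int)
    (hmax : maxIdx = (cs.length : Int) - 1)
    (ht : minIdx ≤ t ∧ t ≤ maxIdx) :
    ∀ (f : Nat) (r : Int), r + f = 121 → 0 ≤ r →
    (∀ i, minIdx ≤ i → i ≤ maxIdx → pvIsNB cs i = true → max minIdx (t - 120) ≤ i → i ≤ min maxIdx (t + 120) → r ≤ (if t ≤ i then i - t else t - i)) →
    pvSnapLoopA cs minIdx maxIdx t f r =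
      (match pvPick t (max minIdx (t - 120)) (min maxIdx (t + 120)) (pvBreaks cs) with
       | none => t
       | some (_, bi) => bi) := by
  intro f
  induction f with
  | zero =>
    intro r hrf hr hno
    have hnone : pvPick t (max minIdx (t - 120)) (min maxIdx (t + 120)) (pvBreaks cs) = none := by
      apply pvPick_none
      intro i hib ⟨h1, h2⟩
      obtain ⟨hi1, hi2, hiNB⟩ := (mem_breaks_iff cs i).mp hib
      have hd := hno i (by omega) (by omega) hiNB h1 h2
      split_ifs at hd <;> omega
    rw [hnone]
    rfl
  | succ f ih =>
    intro r hrf hr hno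
    have hr120 : r ≤ 120 := by omega
    simp only [pvSnapLoopA]
    by_cases hL : minIdx ≤ t - r ∧ pvIsNB cs (t - r) = true
    · rw [if_pos (by simp [hL.1, hL.2])]
      have hdx : (if t ≤ t - r then (t - r) - t else t - (t - r)) = r := by split_ifs <;> omega
      have hp := pvPick_found t (max minIdx (t - 120)) (min maxIdx (t + 120)) (pvBreaks cs) (t - r)
        ((mem_breaks_iff cs (t - r)).mpr ⟨by have := pvIsNB_pos hL.2; omega, by omega, hL.2⟩)
        (by omega) (by omega)
        (by
          intro i hib h1 h2
          obtain ⟨hi1, hi2, hiNB⟩ := (mem_breaks_iff cs i).mp hib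
          have := hno i (by omega) (by omega) hiNB h1 h2
          omega)
        (by
          intro i hib h1 h2 hdeq
          rw [hdx] at hdeq
          split_ifs at hdeq <;> omega)
        (breaks_sorted cs) none (by intro bd bi h; simp at h)
      simp only [pvPick]
      rw [hp]
    · by_cases hR : t + r ≤ maxIdx ∧ pvIsNB cs (t + r) = true
      · rw [if_neg (by simpa [Decidable.not_and_iff_or_not] using hL)]
        rw [if_pos (by simp [hR.1, hR.2])]
        have hdx : (if t ≤ t + r then (t + r) - t else t - (t + r)) = r := by split_ifs <;> omega
        have hp := pvPick_found t (max minIdx (t - 120)) (min maxIdx (t + 120)) (pvBreaks cs) (t + r)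
          ((mem_breaks_iff cs (t + r)).mpr ⟨by have := pvIsNB_pos hR.2; omega, by omega, hR.2⟩)
          (by omega) (by omega)
          (by
            intro i hib h1 h2
            obtain ⟨hi1, hi2, hiNB⟩ := (mem_breaks_iff cs i).mp hib
            have := hno i (by omega) (by omega) hiNB h1 h2
            omega)
          (by
            intro i hib h1 h2 hdeq
            rw [hdx] at hdeq
            obtain ⟨hi1, hi2, hiNB⟩ := (mem_breaks_iff cs i).mp hib
            have hcases : i = t - r ∨ i = t + r := by split_ifs at hdeq <;> omega
            rcases hcases with hc | hc
            · exact absurd ⟨by omega, hc ▸ hiNB⟩ hL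
            · omega)
          (breaks_sorted cs) none (by intro bd bi h; simp at h)
        simp only [pvPick]
        rw [hp]
      · rw [if_neg (by simpa [Decidable.not_and_iff_or_not] using hL)]
        rw [if_neg (by simpa [Decidable.not_and_iff_or_not] using hR)]
        apply ih (r + 1) (by omega) (by omega)
        intro i h1 h2 hiNB h4 h5
        have hge := hno i h1 h2 hiNB h4 h5
        have hne : ¬ (if t ≤ i then i - t else t - i) = r := by
          intro hdeq
          have hcases : i = t - r ∨ i = t + r := by split_ifs at hdeq <;> omega
          rcases hcases with hc | hc
          · exact absurd ⟨by omega, hc ▸ hiNB⟩ hL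
          · exact absurd ⟨by omega, hc ▸ hiNB⟩ hR
        omega

-- per-call agreement of the two snapping strategies
lemma snap_eq (cs : List Char) (target start : Int) :
    pvSnapA cs target start = pvSnapB (pvBreaks cs) (cs.length : Int) target start := by
  simp only [pvSnapA, pvSnapB]
  by_cases h1 : (cs.length : Int) ≤ start
  · rw [if_pos h1, if_pos h1]
  · rw [if_neg h1, if_neg h1]
    by_cases h2 : (cs.length : Int) - 1 < start + 1
    · rw [if_pos h2, if_pos h2]
    · rw [if_neg h2, if_neg h2]
      exact snapLoop_eq_pick cs (start + 1) ((cs.length : Int) - 1) _ rfl ⟨by omega, by omega⟩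
        121 0 (by norm_num) (by norm_num)
        (fun i _ _ _ _ _ => by split_ifs <;> omega)

-- the two loop bodies agree
lemma step_eq (cs : List Char) (totalRef : Int) :
    pvStepA cs totalRef = pvStepB cs (pvBreaks cs) totalRef := by
  funext st len
  simp only [pvStepA, pvStepB, snap_eq]

-- ===== VERDICT (by name: the statement is the Claim_ definition above) =====
theorem split_text_by_reference_lengths_py_spec : Claim_equal_split_text_by_reference_lengths_py := by
  intro text rl _
  show _ = _
  unfold split_text_by_reference_lengths_py split_text_by_reference_lengths_py_alt
  simp only [step_eq]
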